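-- pv_equiv track=rewrite | github.com/Shirobokov-Andrew/HSE_Algorithms | cherepashka_polina.py | dfs
-- ===== SOURCE A (Python) =====
-- def dfs(v, adj, used, banned_vertices):
--     used[v] = True
--     if v == len(used) - 1:
--         return True
--     for u in adj[v].difference(banned_vertices):
--         if not used[u]:
--             if dfs(u, adj, used, banned_vertices):
--                 return True
--     return False
-- ===== SOURCE B (Python) =====
-- def dfs(v, adj, used, banned_vertices):
--     # Iterative DFS with an explicit stack of neighbor iterators; same entry-order
--     # marking of `used` (mutated in place, like the original) and same boolean result.
--     n = len(used)
--     used[v] = True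
--     if v == n - 1:
--         return True
--     stack = [iter(adj[v].difference(banned_vertices))]
--     while stack:
--         advanced = False
--         for u in stack[-1]:
--             if not used[u]:
--                 used[u] = True
--                 if u == n - 1:
--                     return True
--                 stack.append(iter(adj[u].difference(banned_vertices)))
--                 advanced = True
--                 break
--         if not advanced:
--             stack.pop()
--     return False
-- ===== Notes on version B (the rewrite author's own statement) =====
-- stated objective: alternative
-- what changed: The recursive DFS is replaced by an iterative DFS driven by an explicit stack of per-vertex remaining-neighbour frames (a while loop that pops exhausted frames, skips used neighbours and pushes fresh ones), instead of Python call-stack recursion; it marks the same vertices in the same order and returns the same boolean.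
-- outside the precondition, e.g. on dfs(0, [set(), {7}], [False, False], set()): A returns False, B returns False
import Mathlib
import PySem

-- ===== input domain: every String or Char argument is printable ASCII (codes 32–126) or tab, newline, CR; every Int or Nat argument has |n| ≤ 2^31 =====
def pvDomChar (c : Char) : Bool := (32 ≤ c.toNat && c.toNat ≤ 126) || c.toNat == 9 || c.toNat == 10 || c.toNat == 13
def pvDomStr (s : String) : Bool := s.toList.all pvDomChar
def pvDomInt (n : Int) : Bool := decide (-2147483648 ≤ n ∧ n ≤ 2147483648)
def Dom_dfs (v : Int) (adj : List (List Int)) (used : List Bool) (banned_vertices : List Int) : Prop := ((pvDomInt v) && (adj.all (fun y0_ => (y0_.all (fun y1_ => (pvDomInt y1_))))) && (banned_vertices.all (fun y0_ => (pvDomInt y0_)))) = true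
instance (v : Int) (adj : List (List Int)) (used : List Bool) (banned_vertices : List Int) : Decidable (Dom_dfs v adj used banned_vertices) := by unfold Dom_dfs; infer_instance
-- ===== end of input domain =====

-- B changes A's recursive DFS into an iterative DFS with an explicit stack (same entry-order
-- marking of the caller-visible `used` list, which both Pythons mutate in place; the theorems
-- below are about the returned Bool only).

-- A marks one previously-unmarked vertex before each recursive descent, so the recursion depth
-- is bounded by the number of `false` entries of `used`; this lemma justifies the fuel used to
-- make the port of A total (cited below), and the termination measure of B's stack loop.
theorem count_false_set_lt : ∀ (xs : List Bool) (k : Nat), xs[k]? = some false →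
    (xs.set k true).count false < xs.count false := by
  intro xs
  induction xs with
  | nil => intro k h; simp at h
  | cons x t ih =>
    intro k h
    cases k with
    | zero => simp_all
    | succ k => simpa [List.count_cons] using ih k (by simpa using h)

theorem count_false_pySetD_lt (xs : List Bool) (i : Int) (h : PySem.List.pyGet? xs i = some false) :
    (PySem.List.pySetD xs i true).count false < xs.count false := by
  simp only [PySem.List.pyGet?, PySem.List.pySetD, PySem.List.pySet?, PySem.List.pyIdx?] at *
  split_ifs at h ⊢ <;> simp_all
  · exact count_false_set_lt _ _ (by simp [*])
  · exact count_false_set_lt _ _ (by simp [*])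

-- ===== PORT A =====
-- Recursive DFS, as in the Python: mark v, succeed if v is the last vertex, otherwise try each
-- not-yet-used neighbour of v outside `banned` in turn.  `fuel` only makes the recursion total;
-- the wrapper passes `used.count false`, which never runs out on inputs satisfying Pre_
-- (count_false_set_lt above).  A `none` from pyGet? is where the Python raises (outside Pre_).
mutual
def dfsVisit (fuel : Nat) (v : Int) (adj : List (List Int)) (used : List Bool) (banned : List Int) : Bool × List Bool :=
  match PySem.List.pyGet? used v with
  | none => (false, used)                                   -- used[v] = True raises IndexError
  | some _ =>
    let used1 := PySem.List.pySetD used v true              -- used[v] = True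
    if v = (used.length : Int) - 1 then (true, used1)       -- if v == len(used) - 1: return True
    else
      match PySem.List.pyGet? adj v with
      | none => (false, used1)                              -- adj[v] raises IndexError
      | some ns => dfsLoop fuel (PySem.Set.diff ns banned) adj used1 banned
  termination_by (fuel, 1, 0)
def dfsLoop (fuel : Nat) (rest : List Int) (adj : List (List Int)) (used : List Bool) (banned : List Int) : Bool × List Bool :=
  match rest with
  | [] => (false, used)                                     -- return False
  | u :: r =>
    match PySem.List.pyGet? used u with
    | none => (false, used)                                 -- used[u] raises IndexError
    | some true => dfsLoop fuel r adj used banned           -- u already used: next neighbour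
    | some false =>
      match fuel with
      | 0 => (false, used)                                  -- never reached from the wrapper under Pre_
      | fuel' + 1 =>
        match dfsVisit fuel' u adj used banned with
        | (true, used') => (true, used')                    -- if dfs(u, …): return True
        | (false, used') => dfsLoop fuel' r adj used' banned
  termination_by (fuel, 0, rest.length)
end

def dfs (v : Int) (adj : List (List Int)) (used : List Bool) (banned_vertices : List Int) : Bool :=
  (dfsVisit (used.count false) v adj used banned_vertices).1

-- ===== PORT B =====
-- Iterative DFS: the stack holds, per open vertex, the not-yet-tried neighbours; each step
-- pops an exhausted frame, skips a used neighbour, or marks a fresh one and pushes its frame.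
-- Terminates on every input: each step lowers (unmarked count, total stack size).
def dfsStack (adj : List (List Int)) (banned : List Int) (stack : List (List Int)) (used : List Bool) : Bool × List Bool :=
  match stack with
  | [] => (false, used)                                     -- while stack exhausted: return False
  | [] :: stk => dfsStack adj banned stk used               -- iterator exhausted: stack.pop()
  | (u :: r) :: stk =>
    match h : PySem.List.pyGet? used u with
    | none => (false, used)                                 -- used[u] raises IndexError
    | some true => dfsStack adj banned (r :: stk) used      -- u already used: next neighbour
    | some false =>
      let used1 := PySem.List.pySetD used u true            -- used[u] = True
      if u = (used.length : Int) - 1 then (true, used1)     -- if u == n - 1: return True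
      else
        match PySem.List.pyGet? adj u with
        | none => (false, used1)                            -- adj[u] raises IndexError
        | some ns => dfsStack adj banned (PySem.Set.diff ns banned :: r :: stk) used1
  termination_by (used.count false, (stack.map fun fr => fr.length + 1).sum)
  decreasing_by
  all_goals simp [Prod.lex_def]
  all_goals exact Or.inl (count_false_pySetD_lt _ _ (by assumption))

def dfs_alt (v : Int) (adj : List (List Int)) (used : List Bool) (banned_vertices : List Int) : Bool :=
  match PySem.List.pyGet? used v with
  | none => false                                           -- used[v] = True raises IndexError
  | some _ =>
    let used1 := PySem.List.pySetD used v true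
    if v = (used.length : Int) - 1 then true
    else
      match PySem.List.pyGet? adj v with
      | none => false                                       -- adj[v] raises IndexError
      | some ns => (dfsStack adj banned_vertices [PySem.Set.diff ns banned_vertices] used1).1

-- ===== PRECONDITION & SPEC =====
-- Pre_ admits v an in-range index (Python semantics, so possibly negative) and either v already
-- the target vertex (A returns True before looking at adj) or a well-formed graph: adj aligned
-- with used and every listed neighbour an in-range index.  Outside it A usually raises
-- IndexError; it also excludes some inputs on which A still returns (out-of-range non-banned
-- entries that the traversal happens never to reach), where B behaves identically in Python but
-- no equivalence is claimed.
def Pre_dfs (v : Int) (adj : List (List Int)) (used : List Bool) (banned_vertices : List Int) : Prop :=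
  -(used.length : Int) ≤ v ∧ v < (used.length : Int) ∧
    (v = (used.length : Int) - 1 ∨ (adj.length = used.length ∧
      ∀ l ∈ adj, ∀ u ∈ l, u ∉ banned_vertices → -(used.length : Int) ≤ u ∧ u < (used.length : Int)))
instance (v : Int) (adj : List (List Int)) (used : List Bool) (banned_vertices : List Int) : Decidable (Pre_dfs v adj used banned_vertices) := by unfold Pre_dfs; infer_instance

def pvWitness_dfs : Int × List (List Int) × List Bool × List Int := (0, [[1], [0]], [false, false], [])

def Spec_dfs (v : Int) (adj : List (List Int)) (used : List Bool) (banned_vertices : List Int) (out : Bool) : Prop := out = dfs_alt v adj used banned_vertices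
instance (v : Int) (adj : List (List Int)) (used : List Bool) (banned_vertices : List Int) (out : Bool) : Decidable (Spec_dfs v adj used banned_vertices out) := by unfold Spec_dfs; infer_instance

-- ===== CLAIM (what is proved, stated in full; the proofs are below) =====
def Claim_equal_dfs : Prop := ∀ (v : Int) (adj : List (List Int)) (used : List Bool) (banned_vertices : List Int), Dom_dfs v adj used banned_vertices → Pre_dfs v adj used banned_vertices → Spec_dfs v adj used banned_vertices (dfs v adj used banned_vertices)

-- ===== LEMMAS AND PROOFS =====

theorem count_false_set_le (xs : List Bool) (k : Nat) :
    (xs.set k true).count false ≤ xs.count false := by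
  induction xs generalizing k with
  | nil => simp
  | cons x t ih =>
    cases k with
    | zero => cases x <;> simp
    | succ k => simpa [List.count_cons] using ih k


theorem count_false_pySetD_le (xs : List Bool) (i : Int) :
    (PySem.List.pySetD xs i true).count false ≤ xs.count false := by
  simp only [PySem.List.pySetD, PySem.List.pySet?, PySem.List.pyIdx?]
  split_ifs <;> simp [count_false_set_le]


theorem mem_of_mem_diff {x : Int} {s t : List Int} (h : x ∈ PySem.Set.diff s t) : x ∈ s ∧ x ∉ t := by
  simpa [PySem.Set.diff, List.mem_filter] using h

theorem visit_inv_of (f : Nat)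
    (hloop : ∀ (rest : List Int) (adj : List (List Int)) (used : List Bool) (banned : List Int),
      (dfsLoop f rest adj used banned).2.length = used.length ∧
      (dfsLoop f rest adj used banned).2.count false ≤ used.count false)
    (v : Int) (adj : List (List Int)) (used : List Bool) (banned : List Int) :
    (dfsVisit f v adj used banned).2.length = used.length ∧
    (dfsVisit f v adj used banned).2.count false ≤ used.count false := by
  unfold dfsVisit
  cases hg : PySem.List.pyGet? used v with
  | none => simp
  | some b =>
    simp only
    split_ifs with ht
    · simp [count_false_pySetD_le]
    · cases hadj : PySem.List.pyGet? adj v with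
      | none => simp [count_false_pySetD_le]
      | some ns =>
        simp only
        have h1 := hloop (PySem.Set.diff ns banned) adj (PySem.List.pySetD used v true) banned
        refine ⟨by simp [h1.1], le_trans h1.2 (count_false_pySetD_le used v)⟩

theorem loop_inv (fuel : Nat) : ∀ (rest : List Int) (adj : List (List Int)) (used : List Bool) (banned : List Int),
    (dfsLoop fuel rest adj used banned).2.length = used.length ∧
    (dfsLoop fuel rest adj used banned).2.count false ≤ used.count false := by
  induction fuel with
  | zero =>
    intro rest adj used banned
    induction rest generalizing used with
    | nil => simp [dfsLoop]
    | cons u r ih =>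
      unfold dfsLoop
      cases hg : PySem.List.pyGet? used u with
      | none => simp
      | some b => cases b <;> simp [ih]
  | succ f ihf =>
    intro rest adj used banned
    induction rest generalizing used with
    | nil => simp [dfsLoop]
    | cons u r ih =>
      unfold dfsLoop
      cases hg : PySem.List.pyGet? used u with
      | none => simp
      | some b =>
        cases b
        · simp only
          have hv := visit_inv_of f (fun rest adj used banned => ihf rest adj used banned) u adj used banned
          cases hres : dfsVisit f u adj used banned with
          | mk bb w =>
            rw [hres] at hv
            cases bb
            · have h2 := ihf r adj w banned
              simp only
              exact ⟨by rw [h2.1, hv.1], le_trans h2.2 hv.2⟩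
            · simpa using hv
        · simpa using ih used

theorem stackNil (adj : List (List Int)) (banned : List Int) (used : List Bool) :
    dfsStack adj banned [] used = (false, used) := by
  conv_lhs => unfold dfsStack

theorem stackPop (adj : List (List Int)) (banned : List Int) (stk : List (List Int)) (used : List Bool) :
    dfsStack adj banned ([] :: stk) used = dfsStack adj banned stk used := by
  conv_lhs => unfold dfsStack

theorem stackSkip (adj : List (List Int)) (banned : List Int) (u : Int) (r : List Int) (stk : List (List Int)) (used : List Bool)
    (hg : PySem.List.pyGet? used u = some true) :
    dfsStack adj banned ((u :: r) :: stk) used = dfsStack adj banned (r :: stk) used := by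
  conv_lhs => unfold dfsStack
  split <;> simp_all

theorem stackPush (adj : List (List Int)) (banned : List Int) (u : Int) (r : List Int) (stk : List (List Int)) (used : List Bool)
    (hg : PySem.List.pyGet? used u = some false) :
    dfsStack adj banned ((u :: r) :: stk) used =
      (if u = (used.length : Int) - 1 then (true, PySem.List.pySetD used u true)
       else match PySem.List.pyGet? adj u with
        | none => (false, PySem.List.pySetD used u true)
        | some ns => dfsStack adj banned (PySem.Set.diff ns banned :: r :: stk) (PySem.List.pySetD used u true)) := by
  conv_lhs => unfold dfsStack
  split <;> simp_all

theorem loopNil (fuel : Nat) (adj : List (List Int)) (used : List Bool) (banned : List Int) :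
    dfsLoop fuel [] adj used banned = (false, used) := by
  conv_lhs => unfold dfsLoop

theorem loopSkip (fuel : Nat) (adj : List (List Int)) (u : Int) (r : List Int) (used : List Bool) (banned : List Int)
    (hg : PySem.List.pyGet? used u = some true) :
    dfsLoop fuel (u :: r) adj used banned = dfsLoop fuel r adj used banned := by
  conv_lhs => unfold dfsLoop
  rw [hg]

theorem loopVisit (f : Nat) (adj : List (List Int)) (u : Int) (r : List Int) (used : List Bool) (banned : List Int)
    (hg : PySem.List.pyGet? used u = some false) :
    dfsLoop (f + 1) (u :: r) adj used banned =
      (match dfsVisit f u adj used banned with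
       | (true, w) => (true, w)
       | (false, w) => dfsLoop f r adj w banned) := by
  conv_lhs => unfold dfsLoop; rw [hg]

theorem visitTarget (f : Nat) (v : Int) (adj : List (List Int)) (used : List Bool) (banned : List Int)
    (b : Bool) (hg : PySem.List.pyGet? used v = some b) (ht : v = (used.length : Int) - 1) :
    dfsVisit f v adj used banned = (true, PySem.List.pySetD used v true) := by
  conv_lhs => unfold dfsVisit; rw [hg]
  simp [ht]

theorem visitStep (f : Nat) (v : Int) (adj : List (List Int)) (used : List Bool) (banned : List Int)
    (b : Bool) (ns : List Int) (hg : PySem.List.pyGet? used v = some b)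
    (ht : ¬ v = (used.length : Int) - 1) (hadj : PySem.List.pyGet? adj v = some ns) :
    dfsVisit f v adj used banned =
      dfsLoop f (PySem.Set.diff ns banned) adj (PySem.List.pySetD used v true) banned := by
  conv_lhs => unfold dfsVisit; rw [hg]
  simp [ht, hadj]

def GoodL (n : Nat) (l : List Int) : Prop := ∀ u ∈ l, -(n : Int) ≤ u ∧ u < (n : Int)

theorem sim (n : Nat) (adj : List (List Int)) (banned : List Int)
    (hadjlen : adj.length = n) (hadj : ∀ l ∈ adj, ∀ u ∈ l, u ∉ banned → -(n : Int) ≤ u ∧ u < (n : Int)) :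
    ∀ (fuel : Nat) (rest : List Int) (stk : List (List Int)) (used : List Bool),
    used.length = n → GoodL n rest → (∀ fr ∈ stk, GoodL n fr) → used.count false ≤ fuel →
    dfsStack adj banned (rest :: stk) used =
      (match dfsLoop fuel rest adj used banned with
       | (true, w) => (true, w)
       | (false, w) => dfsStack adj banned stk w) := by
  intro fuel
  induction fuel with
  | zero =>
    intro rest
    induction rest with
    | nil =>
      intro stk used hlen hrest hstk hcnt
      rw [stackPop, loopNil]
    | cons u r ihr =>
      intro stk used hlen hrest hstk hcnt
      obtain ⟨h0, h1⟩ := hrest u (List.mem_cons_self)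
      cases hg : PySem.List.pyGet? used u with
      | none =>
        exfalso
        rw [PySem.List.pyGet?_eq_none_iff] at hg
        exact hg (by unfold PySem.Raise.InRange; omega)
      | some b =>
        cases b
        · have hcf : 0 < used.count false := List.count_pos_iff.mpr (PySem.List.mem_of_pyGet?_eq_some _ hg)
          omega
        · rw [stackSkip _ _ _ _ _ _ hg, loopSkip _ _ _ _ _ _ hg]
          exact ihr stk used hlen (fun x hx => hrest x (List.mem_cons_of_mem _ hx)) hstk hcnt
  | succ f ihf =>
    intro rest
    induction rest with
    | nil =>
      intro stk used hlen hrest hstk hcnt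
      rw [stackPop, loopNil]
    | cons u r ihr =>
      intro stk used hlen hrest hstk hcnt
      obtain ⟨h0, h1⟩ := hrest u (List.mem_cons_self)
      cases hg : PySem.List.pyGet? used u with
      | none =>
        exfalso
        rw [PySem.List.pyGet?_eq_none_iff] at hg
        exact hg (by unfold PySem.Raise.InRange; omega)
      | some b =>
        cases b
        · -- fresh vertex: mark and descend
          have hcf : 0 < used.count false := List.count_pos_iff.mpr (PySem.List.mem_of_pyGet?_eq_some _ hg)
          rw [stackPush _ _ _ _ _ _ hg, loopVisit _ _ _ _ _ _ hg]
          by_cases ht : u = (used.length : Int) - 1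
          · rw [if_pos ht, visitTarget f u adj used banned false hg ht]
          · rw [if_neg ht]
            cases hadju : PySem.List.pyGet? adj u with
            | none =>
              exfalso
              rw [PySem.List.pyGet?_eq_none_iff] at hadju
              exact hadju (by unfold PySem.Raise.InRange; omega)
            | some ns =>
            rw [visitStep f u adj used banned false ns hg ht hadju]
            have h1len : (PySem.List.pySetD used u true).length = n := by
              rw [PySem.List.length_pySetD]; exact hlen
            have hgood : GoodL n (PySem.Set.diff ns banned) :=
              fun x hx => hadj _ (PySem.List.mem_of_pyGet?_eq_some _ hadju) x (mem_of_mem_diff hx).1 (mem_of_mem_diff hx).2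
            have hcnt1 : (PySem.List.pySetD used u true).count false ≤ f := by
              have := count_false_pySetD_lt used u hg
              omega
            show dfsStack adj banned (PySem.Set.diff ns banned :: r :: stk) (PySem.List.pySetD used u true) = _
            rw [ihf (PySem.Set.diff ns banned) (r :: stk) (PySem.List.pySetD used u true)
              h1len hgood
              (by
                intro fr hfr
                rcases List.mem_cons.mp hfr with h | h
                · exact h ▸ fun x hx => hrest x (List.mem_cons_of_mem _ hx)
                · exact hstk fr h)
              hcnt1]
            cases hres : dfsLoop f (PySem.Set.diff ns banned) adj (PySem.List.pySetD used u true) banned with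
            | mk bb w =>
              have hwinv := loop_inv f (PySem.Set.diff ns banned) adj (PySem.List.pySetD used u true) banned
              rw [hres] at hwinv
              cases bb
              · -- loop failed: pop back to r, continue
                simp only
                exact ihf r stk w (by rw [hwinv.1, h1len])
                  (fun x hx => hrest x (List.mem_cons_of_mem _ hx)) hstk
                  (le_trans hwinv.2 hcnt1)
              · rfl
        · rw [stackSkip _ _ _ _ _ _ hg, loopSkip _ _ _ _ _ _ hg]
          exact ihr stk used hlen (fun x hx => hrest x (List.mem_cons_of_mem _ hx)) hstk hcnt

theorem dfs_spec' (v : Int) (adj : List (List Int)) (used : List Bool) (banned : List Int)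
    (h0 : -(used.length : Int) ≤ v) (h1 : v < (used.length : Int))
    (h2 : v = (used.length : Int) - 1 ∨ (adj.length = used.length ∧
      ∀ l ∈ adj, ∀ u ∈ l, u ∉ banned → -(used.length : Int) ≤ u ∧ u < (used.length : Int))) :
    dfs v adj used banned = dfs_alt v adj used banned := by
  unfold dfs dfs_alt
  cases hgv : PySem.List.pyGet? used v with
  | none =>
    exfalso
    rw [PySem.List.pyGet?_eq_none_iff] at hgv
    exact hgv (by unfold PySem.Raise.InRange; omega)
  | some b =>
  by_cases ht : v = (used.length : Int) - 1
  · rw [visitTarget _ v adj used banned _ hgv ht]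
    simp [ht]
  · obtain ⟨h2len, h3⟩ := h2.resolve_left ht
    cases hadjv : PySem.List.pyGet? adj v with
    | none =>
      exfalso
      rw [PySem.List.pyGet?_eq_none_iff] at hadjv
      exact hadjv (by unfold PySem.Raise.InRange; omega)
    | some ns =>
    rw [visitStep _ v adj used banned _ ns hgv ht hadjv]
    simp only [if_neg ht]
    show _ = (dfsStack adj banned [PySem.Set.diff ns banned] (PySem.List.pySetD used v true)).1
    rw [sim used.length adj banned h2len (fun l hl x hx hb => h3 l hl x hx hb) (used.count false)
      (PySem.Set.diff ns banned) [] (PySem.List.pySetD used v true)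
      (by rw [PySem.List.length_pySetD])
      (fun x hx => h3 _ (PySem.List.mem_of_pyGet?_eq_some _ hadjv) x (mem_of_mem_diff hx).1 (mem_of_mem_diff hx).2)
      (by intro fr hfr; simp at hfr)
      (count_false_pySetD_le used v)]
    cases hres : dfsLoop (used.count false) (PySem.Set.diff ns banned) adj (PySem.List.pySetD used v true) banned with
    | mk b w => cases b <;> simp [stackNil]

-- ===== VERDICT (by name: the statement is the Claim_ definition above) =====
theorem dfs_spec : Claim_equal_dfs := by
  intro v adj used banned_vertices _ hpre
  show dfs v adj used banned_vertices = dfs_alt v adj used banned_vertices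
  exact dfs_spec' v adj used banned_vertices hpre.1 hpre.2.1 hpre.2.2
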